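-- pv_equiv track=rewrite | github.com/ExpeRepair/ExpeRepair | ExpeRepair-v1.0/inference/generate_w_memory.py | process_modifications_to_exps
-- ===== SOURCE A (Python) =====
-- def process_modifications_to_exps(existing_exps_dict, modification_dict):
--     # Creating a copy of the existing experiences to avoid modifying the original data
--     if not existing_exps_dict:
--         updated_exps = {
--             "tester_exps": [],
--             "coder_exps": [],
--         }
--     else:
--         updated_exps = {
--             "tester_exps": existing_exps_dict.get("tester_exps", []).copy(),
--             "coder_exps": existing_exps_dict.get("coder_exps", []).copy(),
--         }
--
--     # Function to apply the modifications to a specific set of experiences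
--     def apply_modifications(exps, modifications):
--         # Keep track of removed indices to adjust further operations
--         removed_indices = set()
--
--         for mod in modifications:
--             operation = mod["operation"]
--             experience = mod["experience"]
--             number = int(mod["number"]) - 1  # Adjust for 0-based indexing
--
--             if operation == "ADD":
--                 exps.append(experience)
--             elif operation == "REMOVE":
--                 # Adjust the index if the experience has been removed before
--                 adjusted_number = number - sum(1 for idx in removed_indices if idx < number)
--                 if 0 <= adjusted_number < len(exps):
--                     exps.pop(adjusted_number)
--
--                     removed_indices.add(number)
--             elif operation == "EDIT":
--                 # Adjust the index if the experience has been removed before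
--                 adjusted_number = number - sum(1 for idx in removed_indices if idx < number)
--                 if 0 <= adjusted_number < len(exps):
--                     exps[adjusted_number] = experience
--
--         return exps
--
--     # Apply the modifications to both tester and coder experiences
--     updated_exps["tester_exps"] = apply_modifications(updated_exps["tester_exps"], modification_dict.get("tester_exps", []))[:15]
--     updated_exps["coder_exps"] = apply_modifications(updated_exps["coder_exps"], modification_dict.get("coder_exps", []))[:15]
--
--     return updated_exps
-- ===== SOURCE B (Python) =====
-- def process_modifications_to_exps(existing_exps_dict, modification_dict):
--     # B: keeps removed indices in a SORTED list and finds the rank with binary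
--     # search, instead of rescanning an unordered set for every REMOVE/EDIT.
--     def _bisect_left(a, x):
--         lo, hi = 0, len(a)
--         while lo < hi:
--             mid = (lo + hi) // 2
--             if a[mid] < x:
--                 lo = mid + 1
--             else:
--                 hi = mid
--         return lo
--
--     def apply_mods(exps, mods):
--         removed = []  # sorted distinct original indices of successful removals
--         for mod in mods:
--             op = mod["operation"]
--             exp = mod["experience"]
--             n = int(mod["number"]) - 1
--             if op == "ADD":
--                 exps = exps + [exp]
--             else:
--                 pos = _bisect_left(removed, n)  # = how many removed indices are < n
--                 adj = n - pos
--                 if 0 <= adj < len(exps):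
--                     if op == "REMOVE":
--                         exps = exps[:adj] + exps[adj + 1:]
--                         if pos == len(removed) or removed[pos] != n:
--                             removed.insert(pos, n)
--                     elif op == "EDIT":
--                         exps = exps[:adj] + [exp] + exps[adj + 1:]
--         return exps[:15]
--
--     result = {}
--     for key in ("tester_exps", "coder_exps"):
--         base = list(existing_exps_dict.get(key, [])) if existing_exps_dict else []
--         result[key] = apply_mods(base, modification_dict.get(key, []))
--     return result
-- ===== Notes on version B (the rewrite author's own statement) =====
-- stated objective: alternative
-- what changed: A rescans the whole unordered set of removed indices on every REMOVE/EDIT to count how many lie below the target; B keeps the removed indices in a sorted list and obtains that count as a bisect_left rank by binary search, inserting new removed indices at their sorted position, and builds the exps lists by slicing instead of in-place pop/assignment.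
import Mathlib
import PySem

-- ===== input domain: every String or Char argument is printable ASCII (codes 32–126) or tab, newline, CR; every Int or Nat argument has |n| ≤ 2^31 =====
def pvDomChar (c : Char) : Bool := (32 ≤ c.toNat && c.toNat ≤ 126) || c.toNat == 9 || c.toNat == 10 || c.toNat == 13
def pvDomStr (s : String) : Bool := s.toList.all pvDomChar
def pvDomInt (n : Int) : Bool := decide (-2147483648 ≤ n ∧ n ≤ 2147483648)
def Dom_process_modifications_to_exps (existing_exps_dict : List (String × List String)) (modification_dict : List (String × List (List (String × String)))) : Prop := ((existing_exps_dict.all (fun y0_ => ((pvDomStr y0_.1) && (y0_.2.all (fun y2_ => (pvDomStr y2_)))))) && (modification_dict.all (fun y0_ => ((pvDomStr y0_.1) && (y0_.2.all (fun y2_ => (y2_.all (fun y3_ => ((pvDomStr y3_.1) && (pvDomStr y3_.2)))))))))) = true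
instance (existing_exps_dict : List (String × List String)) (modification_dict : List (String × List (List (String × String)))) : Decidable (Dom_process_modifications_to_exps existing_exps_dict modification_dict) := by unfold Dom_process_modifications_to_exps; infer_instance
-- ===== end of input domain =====

-- B replaces A's per-modification rescan of the unordered removed-index set by a sorted list
-- with binary-search rank queries, and builds the lists by slicing instead of in-place pop/set.

-- ===== PORT A =====
-- one modification step of A's apply_modifications loop; state = (exps, removed_indices set)
def pvA_step (st : List String × PySem.Set Int) (mod : List (String × String)) : List String × PySem.Set Int :=
  let exps := st.1
  let removed := st.2
  let operation := (List.lookup "operation" mod).getD ""     -- total form of mod["operation"]; Pre_ guarantees presence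
  let experience := (List.lookup "experience" mod).getD ""
  let number := ((List.lookup "number" mod).bind PySem.Int.ofStr?).getD 0 - 1   -- int(mod["number"]) - 1; Pre_ guarantees it parses
  if operation = "ADD" then
    (exps ++ [experience], removed)
  else if operation = "REMOVE" then
    let adjusted := number - (removed.map (fun idx => if decide (idx < number) = true then (1 : Int) else 0)).sum
    if 0 ≤ adjusted ∧ adjusted < (exps.length : Int) then
      match PySem.List.pop? exps adjusted with
      | some r => (r.2, PySem.Set.add removed number)
      | none => (exps, removed)      -- unreachable under the range guard
    else (exps, removed)
  else if operation = "EDIT" then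
    let adjusted := number - (removed.map (fun idx => if decide (idx < number) = true then (1 : Int) else 0)).sum
    if 0 ≤ adjusted ∧ adjusted < (exps.length : Int) then
      (PySem.List.pySetD exps adjusted experience, removed)
    else (exps, removed)
  else (exps, removed)

def pvA_apply (exps : List String) (mods : List (List (String × String))) : List String :=
  (mods.foldl pvA_step (exps, PySem.Set.empty)).1

def process_modifications_to_exps (existing_exps_dict : List (String × List String)) (modification_dict : List (String × List (List (String × String)))) : List (String × List String) :=
  let updated :=
    if existing_exps_dict = [] then
      [("tester_exps", ([] : List String)), ("coder_exps", ([] : List String))]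
    else
      [("tester_exps", (List.lookup "tester_exps" existing_exps_dict).getD []),
       ("coder_exps", (List.lookup "coder_exps" existing_exps_dict).getD [])]
  let tester := PySem.List.slice (pvA_apply ((List.lookup "tester_exps" updated).getD []) ((List.lookup "tester_exps" modification_dict).getD [])) none (some 15)
  let coder := PySem.List.slice (pvA_apply ((List.lookup "coder_exps" updated).getD []) ((List.lookup "coder_exps" modification_dict).getD [])) none (some 15)
  [("tester_exps", tester), ("coder_exps", coder)]

-- ===== PORT B =====
-- hand-written bisect_left of Source B (lo/hi while loop)
def pvBisect (a : List Int) (x : Int) (lo hi : Nat) : Nat :=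
  if lo < hi then
    let mid := (lo + hi) / 2
    if a.getD mid 0 < x then pvBisect a x (mid + 1) hi
    else pvBisect a x lo mid
  else lo
termination_by hi - lo
decreasing_by all_goals omega

-- one step of Source B's apply_mods loop; state = (exps, sorted removed list)
def pvB_step (st : List String × List Int) (mod : List (String × String)) : List String × List Int :=
  let exps := st.1
  let removed := st.2
  let op := (List.lookup "operation" mod).getD ""
  let exp := (List.lookup "experience" mod).getD ""
  let n := ((List.lookup "number" mod).bind PySem.Int.ofStr?).getD 0 - 1
  if op = "ADD" then
    (exps ++ [exp], removed)
  else
    let pos := pvBisect removed n 0 removed.length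
    let adj := n - (pos : Int)
    if 0 ≤ adj ∧ adj < (exps.length : Int) then
      if op = "REMOVE" then
        (PySem.List.slice exps none (some adj) ++ PySem.List.slice exps (some (adj + 1)) none,
         if pos = removed.length ∨ ¬ removed.getD pos 0 = n then PySem.List.insert removed (pos : Int) n else removed)
      else if op = "EDIT" then
        (PySem.List.slice exps none (some adj) ++ [exp] ++ PySem.List.slice exps (some (adj + 1)) none, removed)
      else (exps, removed)
    else (exps, removed)

def pvB_apply (exps : List String) (mods : List (List (String × String))) : List String :=
  PySem.List.slice ((mods.foldl pvB_step (exps, ([] : List Int))).1) none (some 15)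

def process_modifications_to_exps_alt (existing_exps_dict : List (String × List String)) (modification_dict : List (String × List (List (String × String)))) : List (String × List String) :=
  ["tester_exps", "coder_exps"].map (fun key =>
    (key,
     pvB_apply
       (if existing_exps_dict = [] then [] else (List.lookup key existing_exps_dict).getD [])
       ((List.lookup key modification_dict).getD [])))

-- ===== PRECONDITION & SPEC =====
-- Pre_ excludes exactly the inputs on which the Python A raises: a modification under the
-- "tester_exps"/"coder_exps" keys missing one of the keys "operation"/"experience"/"number"
-- (KeyError) or whose "number" value is not int()-parsable (ValueError).
def pvModOk (mod : List (String × String)) : Prop :=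
  (List.lookup "operation" mod).isSome = true ∧
  (List.lookup "experience" mod).isSome = true ∧
  ((List.lookup "number" mod).bind PySem.Int.ofStr?).isSome = true

def Pre_process_modifications_to_exps (existing_exps_dict : List (String × List String)) (modification_dict : List (String × List (List (String × String)))) : Prop :=
  ∀ key ∈ ["tester_exps", "coder_exps"], ∀ mod ∈ (List.lookup key modification_dict).getD [], pvModOk mod

instance (existing_exps_dict : List (String × List String)) (modification_dict : List (String × List (List (String × String)))) : Decidable (Pre_process_modifications_to_exps existing_exps_dict modification_dict) := by
  unfold Pre_process_modifications_to_exps; unfold pvModOk; infer_instance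

def pvWitness_process_modifications_to_exps : (List (String × List String)) × (List (String × List (List (String × String)))) :=
  ([("tester_exps", ["a", "b"]), ("coder_exps", ["c"])],
   [("tester_exps", [[("operation", "ADD"), ("experience", "x"), ("number", "1")],
                     [("operation", "REMOVE"), ("experience", ""), ("number", "1")]]),
    ("coder_exps", [[("operation", "EDIT"), ("experience", "y"), ("number", "1")]])])

def Spec_process_modifications_to_exps (existing_exps_dict : List (String × List String)) (modification_dict : List (String × List (List (String × String)))) (out : List (String × List String)) : Prop := out = process_modifications_to_exps_alt existing_exps_dict modification_dict
instance (existing_exps_dict : List (String × List String)) (modification_dict : List (String × List (List (String × String)))) (out : List (String × List String)) : Decidable (Spec_process_modifications_to_exps existing_exps_dict modification_dict out) := by unfold Spec_process_modifications_to_exps; infer_instance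

-- ===== CLAIM (what is proved, stated in full; the proofs are below) =====
def Claim_equal_process_modifications_to_exps : Prop := ∀ (existing_exps_dict : List (String × List String)) (modification_dict : List (String × List (List (String × String)))), Dom_process_modifications_to_exps existing_exps_dict modification_dict → Pre_process_modifications_to_exps existing_exps_dict modification_dict → Spec_process_modifications_to_exps existing_exps_dict modification_dict (process_modifications_to_exps existing_exps_dict modification_dict)

-- ===== LEMMAS AND PROOFS =====

-- countP (· < x) bounds on a (· ≤ ·)-sorted list
lemma pv_cP_lt (x : Int) : ∀ (a : List Int), a.Pairwise (· ≤ ·) → ∀ m (hm : m < a.length),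
    a[m] < x → m < a.countP (fun v => decide (v < x)) := by
  intro a
  induction a with
  | nil => intro _ m hm; simp at hm
  | cons u t ih =>
    intro hpw m hm h
    rcases List.pairwise_cons.mp hpw with ⟨hu, hpt⟩
    cases m with
    | zero =>
      simp at h
      simp [h]
    | succ m =>
      simp at hm
      have hm' : m < t.length := hm
      have htm : t[m] < x := by simpa using h
      have := ih hpt m hm' htm
      have hux : u < x := lt_of_le_of_lt (hu t[m] (t.getElem_mem hm')) htm
      simp [hux]
      omega

lemma pv_cP_ge (x : Int) : ∀ (a : List Int), a.Pairwise (· ≤ ·) → ∀ m (hm : m < a.length),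
    ¬ a[m] < x → a.countP (fun v => decide (v < x)) ≤ m := by
  intro a
  induction a with
  | nil => intro _ m hm; simp at hm
  | cons u t ih =>
    intro hpw m hm h
    rcases List.pairwise_cons.mp hpw with ⟨hu, hpt⟩
    cases m with
    | zero =>
      simp at h
      have : (u :: t).countP (fun v => decide (v < x)) = 0 := by
        apply List.countP_eq_zero.mpr
        intro v hv
        simp
        rcases List.mem_cons.mp hv with rfl | hv
        · exact h
        · exact le_trans h (hu v hv)
      omega
    | succ m =>
      simp at hm
      have := ih hpt m hm (by simpa using h)
      by_cases hux : u < x <;> simp [hux] <;> omega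

lemma pv_cP_idx (x : Int) (a : List Int) (hpw : a.Pairwise (· ≤ ·)) (m : Nat) (hm : m < a.length)
    (h : m < a.countP (fun v => decide (v < x))) : a[m] < x := by
  by_contra hc
  have := pv_cP_ge x a hpw m hm hc
  omega

-- binary search computes the rank
lemma pvBisect_eq_aux (a : List Int) (x : Int) (hpw : a.Pairwise (· ≤ ·)) :
    ∀ (fuel lo hi : Nat), hi - lo ≤ fuel → hi ≤ a.length →
      lo ≤ a.countP (fun v => decide (v < x)) → a.countP (fun v => decide (v < x)) ≤ hi →
      pvBisect a x lo hi = a.countP (fun v => decide (v < x)) := by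
  intro fuel
  induction fuel with
  | zero =>
    intro lo hi hf hhi h1 h2
    rw [pvBisect]
    have : ¬ lo < hi := by omega
    simp [this]
    omega
  | succ fuel ih =>
    intro lo hi hf hhi h1 h2
    rw [pvBisect]
    by_cases hlt : lo < hi
    · simp only [hlt, if_true]
      have hmid1 : lo ≤ (lo + hi) / 2 := by omega
      have hmid2 : (lo + hi) / 2 < hi := by omega
      have hmlen : (lo + hi) / 2 < a.length := by omega
      rw [List.getD_eq_getElem a 0 hmlen]
      by_cases hax : a[(lo + hi) / 2] < x
      · simp only [hax, if_true]
        have := pv_cP_lt x a hpw _ hmlen hax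
        exact ih ((lo + hi) / 2 + 1) hi (by omega) hhi (by omega) h2
      · simp only [hax, if_false]
        have := pv_cP_ge x a hpw _ hmlen hax
        exact ih lo ((lo + hi) / 2) (by omega) (by omega) h1 (by omega)
    · simp [hlt]
      omega

lemma pvBisect_eq (a : List Int) (x : Int) (hpw : a.Pairwise (· ≤ ·)) :
    pvBisect a x 0 a.length = a.countP (fun v => decide (v < x)) :=
  pvBisect_eq_aux a x hpw a.length 0 a.length (by omega) (by omega) (by omega)
    List.countP_le_length

-- the invariant tying A's removed set to B's sorted removed list
def pvInv (ra : PySem.Set Int) (rb : List Int) : Prop :=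
  ra.Nodup ∧ rb.Pairwise (· < ·) ∧ ∀ y : Int, y ∈ ra ↔ y ∈ rb

lemma pvInv_counts {ra : PySem.Set Int} {rb : List Int} (h : pvInv ra rb) (x : Int) :
    ra.countP (fun v => decide (v < x)) = rb.countP (fun v => decide (v < x)) := by
  rcases h with ⟨hna, hpb, hmem⟩
  have hnb : rb.Nodup := hpb.imp (fun h => ne_of_lt h)
  exact ((List.perm_ext_iff_of_nodup hna hnb).mpr hmem).countP_eq _

-- inserting a fresh element at its rank keeps the list strictly sorted
lemma pv_insert_sorted (rb : List Int) (n : Int) (hpb : rb.Pairwise (· < ·)) (hn : n ∉ rb) :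
    (rb.take (rb.countP (fun v => decide (v < n))) ++ n :: rb.drop (rb.countP (fun v => decide (v < n)))).Pairwise (· < ·) := by
  set c := rb.countP (fun v => decide (v < n)) with hc
  have hpw : rb.Pairwise (· ≤ ·) := hpb.imp (fun h => le_of_lt h)
  have hcl : c ≤ rb.length := List.countP_le_length
  have htake : ∀ y ∈ rb.take c, y < n := by
    intro y hy
    rcases List.mem_iff_getElem.mp hy with ⟨i, hi, rfl⟩
    have hi' : i < c ∧ i < rb.length := by simpa using hi
    rw [List.getElem_take]
    exact pv_cP_idx n rb hpw i (by omega) (by omega)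
  have hdrop : ∀ y ∈ rb.drop c, n < y := by
    intro y hy
    rcases List.mem_iff_getElem.mp hy with ⟨i, hi, rfl⟩
    rw [List.getElem_drop]
    have hlen : c + i < rb.length := by simp at hi; omega
    have h1 : ¬ rb[c + i] < n := by
      intro hlt
      have := pv_cP_lt n rb hpw (c + i) hlen hlt
      omega
    have h2 : rb[c + i] ≠ n := by
      intro he
      exact hn (he ▸ rb.getElem_mem hlen)
    omega
  apply List.pairwise_append.mpr
  refine ⟨hpb.sublist (List.take_sublist _ _), ?_, ?_⟩
  · apply List.pairwise_cons.mpr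
    exact ⟨hdrop, hpb.sublist (List.drop_sublist _ _)⟩
  · intro y hy z hz
    rcases List.mem_cons.mp hz with rfl | hz
    · exact htake y hy
    · exact lt_trans (htake y hy) (hdrop z hz)

-- the "not already removed" test of B detects membership
lemma pv_cond_iff (rb : List Int) (n : Int) (hpb : rb.Pairwise (· < ·)) :
    ((rb.countP (fun v => decide (v < n)) = rb.length ∨
      ¬ rb.getD (rb.countP (fun v => decide (v < n))) 0 = n) ↔ n ∉ rb) := by
  set c := rb.countP (fun v => decide (v < n)) with hc
  have hpw : rb.Pairwise (· ≤ ·) := hpb.imp (fun h => le_of_lt h)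
  have hcl : c ≤ rb.length := List.countP_le_length
  constructor
  · rintro (h | h) hmem
    · rcases List.mem_iff_getElem.mp hmem with ⟨k, hk, hkn⟩
      have : ¬ rb[k] < n := by omega
      have := pv_cP_ge n rb hpw k hk this
      omega
    · apply h
      rcases List.mem_iff_getElem.mp hmem with ⟨k, hk, hkn⟩
      -- c = k : below k everything is < n, at k it is n
      have hk1 : c ≤ k := pv_cP_ge n rb hpw k hk (by omega)
      have hk2 : k ≤ c := by
        cases k with
        | zero => omega
        | succ k' =>
          have hlt : rb[k'] < n := by
            have := List.pairwise_iff_getElem.mp hpb k' (k' + 1) (by omega) hk (by omega)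
            omega
          have := pv_cP_lt n rb hpw k' (by omega) hlt
          omega
      have hck : c = k := by omega
      rw [List.getD_eq_getElem rb 0 (by omega : c < rb.length)]
      simp [hck, hkn]
  · intro hmem
    by_cases hcL : c = rb.length
    · exact Or.inl hcL
    · refine Or.inr ?_
      intro he
      rw [List.getD_eq_getElem rb 0 (by omega : c < rb.length)] at he
      exact hmem (he ▸ rb.getElem_mem (by omega))

-- one modification step preserves the invariant and produces the same exps
lemma pv_step_eq (e : List String) (ra : PySem.Set Int) (rb : List Int) (mod : List (String × String))
    (h : pvInv ra rb) :
    (pvA_step (e, ra) mod).1 = (pvB_step (e, rb) mod).1 ∧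
    pvInv (pvA_step (e, ra) mod).2 (pvB_step (e, rb) mod).2 := by
  rcases h with ⟨hna, hpb, hmem⟩
  have hinv : pvInv ra rb := ⟨hna, hpb, hmem⟩
  have hpw : rb.Pairwise (· ≤ ·) := hpb.imp (fun h => le_of_lt h)
  unfold pvA_step pvB_step
  set op := (List.lookup "operation" mod).getD "" with hop
  set exp := (List.lookup "experience" mod).getD "" with hexp
  set n := ((List.lookup "number" mod).bind PySem.Int.ofStr?).getD 0 - 1 with hn
  -- A's generator sum = B's bisect rank
  have hsum : (ra.map (fun idx => if decide (idx < n) = true then (1 : Int) else 0)).sum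
      = ((pvBisect rb n 0 rb.length : Nat) : Int) := by
    rw [PySem.List.sum_map_ite_one_zero (fun idx => decide (idx < n)) ra,
        pvBisect_eq rb n hpw, pvInv_counts hinv n]
  by_cases hadd : op = "ADD"
  · simp [hadd, hinv]
  · simp only [hadd, if_false]
    set pos := pvBisect rb n 0 rb.length with hpos
    have hposc : pos = rb.countP (fun v => decide (v < n)) := pvBisect_eq rb n hpw
    have hposl : pos ≤ rb.length := by rw [hposc]; exact List.countP_le_length
    by_cases hrem : op = "REMOVE"
    · simp only [hrem, if_true, hsum]
      by_cases hrange : 0 ≤ n - (pos : Int) ∧ n - (pos : Int) < (e.length : Int)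
      · simp only [hrange, if_true, and_true]
        set adj := n - (pos : Int) with hadj
        have hnat : adj = ((adj.toNat : Nat) : Int) := by omega
        have hlt : adj.toNat < e.length := by omega
        have hpop : PySem.List.pop? e adj = some (e[adj.toNat], e.eraseIdx adj.toNat) := by
          have h0 := PySem.List.pop?_natCast e adj.toNat hlt
          rwa [← hnat] at h0
        rw [hpop]
        constructor
        · -- exps: eraseIdx = take ++ drop (adj+1)
          show e.eraseIdx adj.toNat =
            PySem.List.slice e none (some adj) ++ PySem.List.slice e (some (adj + 1)) none
          rw [PySem.List.slice_to e hrange.1, PySem.List.slice_from e (by omega : (0:Int) ≤ adj + 1),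
              List.eraseIdx_eq_take_drop_succ]
          have : (adj + 1).toNat = adj.toNat + 1 := by omega
          rw [this]
        · -- removed: Set.add vs sorted insert
          show pvInv (PySem.Set.add ra n)
            (if pos = rb.length ∨ ¬ rb.getD pos 0 = n then PySem.List.insert rb (pos : Int) n else rb)
          by_cases hni : n ∈ rb
          · have hcond : ¬ (pos = rb.length ∨ ¬ rb.getD pos 0 = n) := by
              rw [hposc]
              intro hcc
              exact ((pv_cond_iff rb n hpb).mp hcc) hni
            rw [if_neg hcond, PySem.Set.add_of_mem ((hmem n).mpr hni)]
            exact hinv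
          · have hcond : pos = rb.length ∨ ¬ rb.getD pos 0 = n := by
              rw [hposc]
              exact (pv_cond_iff rb n hpb).mpr hni
            rw [if_pos hcond, PySem.List.insert_natCast rb pos n hposl,
                PySem.Set.add_of_not_mem (fun hc => hni ((hmem n).mp hc))]
            refine ⟨?_, ?_, ?_⟩
            · -- nodup of ra ++ [n]
              rw [List.nodup_append]
              refine ⟨hna, List.nodup_singleton n, ?_⟩
              intro x hx y hy
              rw [List.mem_singleton] at hy
              subst hy
              intro hxy
              exact hni (hxy ▸ (hmem x).mp hx)
            · rw [hposc]; exact pv_insert_sorted rb n hpb hni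
            · intro y
              constructor
              · intro hy
                rcases List.mem_append.mp hy with hy | hy
                · have := (hmem y).mp hy
                  rcases List.mem_iff_getElem.mp this with ⟨i, hi, rfl⟩
                  by_cases hip : i < pos
                  · apply List.mem_append.mpr; left
                    apply List.mem_iff_getElem.mpr
                    refine ⟨i, by simp; omega, ?_⟩
                    simp [List.getElem_take]
                  · apply List.mem_append.mpr; right
                    apply List.mem_cons.mpr; right
                    apply List.mem_iff_getElem.mpr
                    refine ⟨i - pos, by simp; omega, ?_⟩
                    rw [List.getElem_drop]
                    congr 1
                    omega
                · simp at hy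
                  subst hy
                  exact List.mem_append.mpr (Or.inr (List.mem_cons_self))
              · intro hy
                rcases List.mem_append.mp hy with hy | hy
                · exact List.mem_append.mpr (Or.inl ((hmem y).mpr (List.mem_of_mem_take hy)))
                · rcases List.mem_cons.mp hy with rfl | hy
                  · exact List.mem_append.mpr (Or.inr (List.mem_singleton.mpr rfl))
                  · exact List.mem_append.mpr (Or.inl ((hmem y).mpr (List.mem_of_mem_drop hy)))
      · rw [if_neg hrange, if_neg hrange]
        exact ⟨rfl, hinv⟩
    · by_cases hedit : op = "EDIT"
      · simp only [hedit, hsum, String.reduceEq, reduceIte]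
        by_cases hrange : 0 ≤ n - (pos : Int) ∧ n - (pos : Int) < (e.length : Int)
        · simp only [hrange, if_true, and_true]
          set adj := n - (pos : Int) with hadj
          have hlt : adj.toNat < e.length := by omega
          constructor
          · show PySem.List.pySetD e adj exp =
              PySem.List.slice e none (some adj) ++ [exp] ++ PySem.List.slice e (some (adj + 1)) none
            rw [PySem.List.pySetD_of_nonneg e exp hrange.1,
                PySem.List.slice_to e hrange.1, PySem.List.slice_from e (by omega : (0:Int) ≤ adj + 1),
                List.set_eq_take_cons_drop exp hlt]
            have : (adj + 1).toNat = adj.toNat + 1 := by omega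
            rw [this]
            simp
          · exact hinv
        · rw [if_neg hrange, if_neg hrange]
          exact ⟨rfl, hinv⟩
      · simp [hrem, hedit, hinv]

-- folding the two step functions from invariant-linked states gives the same exps
lemma pv_fold_eq (mods : List (List (String × String))) :
    ∀ (e : List String) (ra : PySem.Set Int) (rb : List Int), pvInv ra rb →
      (mods.foldl pvA_step (e, ra)).1 = (mods.foldl pvB_step (e, rb)).1 := by
  induction mods with
  | nil => intro e ra rb _; rfl
  | cons mod rest ih =>
    intro e ra rb h
    rcases pv_step_eq e ra rb mod h with ⟨he, hinv'⟩
    simp only [List.foldl_cons]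
    have : pvA_step (e, ra) mod = ((pvB_step (e, rb) mod).1, (pvA_step (e, ra) mod).2) := by
      exact Prod.ext he rfl
    rw [this]
    exact ih _ _ _ hinv'

lemma pv_apply_eq (exps : List String) (mods : List (List (String × String))) :
    PySem.List.slice (pvA_apply exps mods) none (some 15) = pvB_apply exps mods := by
  unfold pvA_apply pvB_apply
  congr 1
  exact pv_fold_eq mods exps PySem.Set.empty []
    ⟨List.nodup_nil, List.Pairwise.nil, by simp [PySem.Set.empty]⟩

-- ===== VERDICT (by name: the statement is the Claim_ definition above) =====
theorem process_modifications_to_exps_spec : Claim_equal_process_modifications_to_exps := by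
  unfold Claim_equal_process_modifications_to_exps
  intro e m _ _
  unfold Spec_process_modifications_to_exps
  unfold process_modifications_to_exps process_modifications_to_exps_alt
  simp only [List.map]
  by_cases he : e = []
  · simp only [he, if_true]
    rw [← pv_apply_eq, ← pv_apply_eq]
    simp [List.lookup]
  · simp only [he, if_false]
    rw [← pv_apply_eq, ← pv_apply_eq]
    simp [List.lookup]
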